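-- pv_equiv track=rewrite | github.com/ChrisSteinbach/RationalRecipes | scripts/inspect_variant_provenance.py | _substring_fallback
-- ===== SOURCE A (Python) =====
-- from collections.abc import Iterable, Mapping
--
-- def _substring_fallback(
--     form_key: str, canonical_map: Mapping[str, str]
-- ) -> str | None:
--     """Map a form_key to a variant canonical via whole-word substring match.
--
--     Picks the longest matching canonical-form key when several match (so
--     ``70% cacao chocolate chips`` lands on ``chocolate chips`` rather than
--     a single-word ``chips`` if both were in the map). Whole-word boundary
--     is checked via space-padded comparison to avoid ``salt`` matching
--     inside ``shallot``.
--     """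
--     if not form_key:
--         return None
--     padded = f" {form_key} "
--     best: tuple[int, str] | None = None
--     for form, target in canonical_map.items():
--         if not form:
--             continue
--         needle = f" {form} "
--         starts = padded.startswith(form + " ")
--         ends = padded.endswith(" " + form)
--         if needle in padded or starts or ends:
--             if best is None or len(form) > best[0]:
--                 best = (len(form), target)
--     return best[1] if best else None
-- ===== SOURCE B (Python) =====
-- def _substring_fallback(form_key, canonical_map):
--     """Whole-word longest-match lookup.
--
--     Pad the key with one space on each side so its ends count as word
--     boundaries, enumerate every span of the padded key delimited by two
--     spaces into a set, then take the longest map key among those spans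
--     in a single max() pass.
--     """
--     if not form_key:
--         return None
--     padded = f" {form_key} "
--     spaces = [i for i, c in enumerate(padded) if c == " "]
--     spans = {padded[i + 1:j] for i in spaces for j in spaces if i < j}
--     matched = [(form, target) for form, target in canonical_map.items()
--                if form and form in spans]
--     if not matched:
--         return None
--     return max(matched, key=lambda ft: len(ft[0]))[1]
-- ===== Notes on version B (the rewrite author's own statement) =====
-- stated objective: faster
-- what changed: Instead of running three substring/prefix/suffix scans of the padded key for every map entry, B enumerates the space-delimited spans of the padded key once into a set and picks the longest matching entry in one filtered max() pass; Pre_ excludes maps containing a space-edged key that matches only through A's boundary-anchored startswith/endswith tests rather than as a space-delimited occurrence, an artefact of A's space-padded comparisons on an unspecified corner.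
-- outside the precondition, e.g. on _substring_fallback('foo bar', {' foo': 'x'}): A returns 'x', B returns None; on _substring_fallback('foo bar', {'bar ': 'y'}): A returns 'y', B returns None
import Mathlib
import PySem

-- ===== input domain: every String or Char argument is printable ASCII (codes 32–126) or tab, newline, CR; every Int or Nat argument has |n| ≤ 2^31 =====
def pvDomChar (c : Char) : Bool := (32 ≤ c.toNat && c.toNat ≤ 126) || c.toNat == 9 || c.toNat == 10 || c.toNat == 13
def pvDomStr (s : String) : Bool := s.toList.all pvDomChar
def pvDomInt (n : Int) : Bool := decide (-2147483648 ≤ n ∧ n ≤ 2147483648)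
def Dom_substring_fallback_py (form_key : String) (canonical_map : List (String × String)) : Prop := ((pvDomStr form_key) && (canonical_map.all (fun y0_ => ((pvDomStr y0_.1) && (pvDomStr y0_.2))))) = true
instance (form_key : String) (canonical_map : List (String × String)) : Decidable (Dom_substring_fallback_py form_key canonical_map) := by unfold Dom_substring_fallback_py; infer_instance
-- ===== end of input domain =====

-- B replaces A's per-entry substring/prefix/suffix scans by one enumeration of the padded
-- key's space-delimited spans into a set, then a single filtered max pass (faster algorithm);
-- Pre_ excludes maps with a space-edged key, where A's padded comparisons match accidentally.


-- ===== PORT A =====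
-- literal transliteration of _substring_fallback (ported on the List Char side, exact on the ASCII domain)
def substring_fallback_py (form_key : String) (canonical_map : List (String × String)) : Option String :=
  if form_key.toList = [] then none
  else
    let padded : List Char := [' '] ++ form_key.toList ++ [' ']
    let best : Option (Nat × String) := canonical_map.foldl (fun best ft =>
      if ft.1.toList = [] then best
      else
        if PySem.Chars.isIn ([' '] ++ ft.1.toList ++ [' ']) padded
           || PySem.Chars.startswith padded (ft.1.toList ++ [' '])
           || PySem.Chars.endswith padded ([' '] ++ ft.1.toList) then
          match best with
          | none => some (ft.1.toList.length, ft.2)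
          | some b => if b.1 < ft.1.toList.length then some (ft.1.toList.length, ft.2) else some b
        else best) none
    best.map (·.2)

-- ===== PORT B =====
-- space positions of padded: [i for i, c in enumerate(padded) if c == " "]
def pvSp (padded : List Char) : List Int :=
  ((PySem.List.enumerate padded 0).filter (fun p => p.2 == ' ')).map (·.1)

-- {padded[i+1:j] for i in spaces for j in spaces if i < j}
def pvSpans (padded : List Char) : List (List Char) :=
  (pvSp padded).flatMap (fun i =>
    ((pvSp padded).filter (fun j => i < j)).map (fun j =>
      PySem.List.slice padded (some (i + 1)) (some j)))

def substring_fallback_py_alt (form_key : String) (canonical_map : List (String × String)) : Option String :=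
  if form_key.toList = [] then none
  else
    let padded : List Char := [' '] ++ form_key.toList ++ [' ']
    let spans : PySem.Set (List Char) := PySem.Set.ofList (pvSpans padded)
    let matched := canonical_map.filter (fun ft => !ft.1.toList.isEmpty && spans.contains ft.1.toList)
    (PySem.List.max? matched (fun ft => ft.1.toList.length)).map (·.2)

-- ===== PRECONDITION & SPEC =====
-- Pre_ excludes maps containing a key that whole-word-matches the form key ONLY through A's
-- boundary-anchored startswith/endswith tests and not as a space-delimited occurrence (this needs
-- a key with a leading or trailing space): whether such a space-edged key matches is unspecified,
-- and A's acceptance there is an artefact of its space-padded comparisons.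
def Pre_substring_fallback_py (form_key : String) (canonical_map : List (String × String)) : Prop :=
  ∀ ft ∈ canonical_map,
    (ft.1.toList ≠ [] ∧
      (ft.1.toList ++ [' '] <+: ([' '] ++ form_key.toList ++ [' ']) ∨
       ' ' :: ft.1.toList <:+ ([' '] ++ form_key.toList ++ [' ']))) →
    ' ' :: (ft.1.toList ++ [' ']) <:+: ([' '] ++ form_key.toList ++ [' '])
instance (form_key : String) (canonical_map : List (String × String)) : Decidable (Pre_substring_fallback_py form_key canonical_map) := by unfold Pre_substring_fallback_py; infer_instance

def pvWitness_substring_fallback_py : String × (List (String × String)) :=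
  ("70% cacao chocolate chips", [("chips", "chips"), ("chocolate chips", "chocolate chips")])

def Spec_substring_fallback_py (form_key : String) (canonical_map : List (String × String)) (out : Option String) : Prop := out = substring_fallback_py_alt form_key canonical_map
instance (form_key : String) (canonical_map : List (String × String)) (out : Option String) : Decidable (Spec_substring_fallback_py form_key canonical_map out) := by unfold Spec_substring_fallback_py; infer_instance

-- ===== CLAIM (what is proved, stated in full; the proofs are below) =====
def Claim_equal_substring_fallback_py : Prop := ∀ (form_key : String) (canonical_map : List (String × String)), Dom_substring_fallback_py form_key canonical_map → Pre_substring_fallback_py form_key canonical_map → Spec_substring_fallback_py form_key canonical_map (substring_fallback_py form_key canonical_map)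

-- ===== LEMMAS AND PROOFS =====

-- " f " occurs in s iff f is the segment between two space positions
lemma pv_infix_iff (s f : List Char) :
    ' ' :: (f ++ [' ']) <:+: s ↔
      ∃ (m₁ m₂ : Nat) (h₁ : m₁ < s.length) (h₂ : m₂ < s.length),
        m₁ < m₂ ∧ s[m₁] = ' ' ∧ s[m₂] = ' ' ∧ f = (s.drop (m₁ + 1)).take (m₂ - (m₁ + 1)) := by
  constructor
  · rintro ⟨l, r, hlr⟩
    subst hlr
    refine ⟨l.length, l.length + f.length + 1, ?_, ?_, by omega, ?_, ?_, ?_⟩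
    · simp
    · simp; omega
    · rw [List.getElem_append_left (by simp), List.getElem_append_right (le_refl _)]
      simp
    · rw [List.getElem_append_left (by simp; omega),
        List.getElem_append_right (by omega : l.length ≤ l.length + f.length + 1)]
      have he : l.length + f.length + 1 - l.length = f.length + 1 := by omega
      simp only [he, List.getElem_cons_succ]
      rw [List.getElem_append_right (le_refl _)]
      simp
    · have he : l.length + f.length + 1 - (l.length + 1) = f.length := by omega
      rw [he, List.append_assoc, ← List.drop_drop, List.drop_left]
      simp
  · rintro ⟨m₁, m₂, h₁, h₂, hlt, hm₁, hm₂, hf⟩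
    refine ⟨s.take m₁, s.drop (m₂ + 1), ?_⟩
    have hd1 : s.drop (m₁ + 1) =
        (s.drop (m₁ + 1)).take (m₂ - (m₁ + 1)) ++ ' ' :: s.drop (m₂ + 1) := by
      conv_lhs => rw [← List.take_append_drop (m₂ - (m₁ + 1)) (s.drop (m₁ + 1))]
      rw [List.drop_drop]
      have hm : m₁ + 1 + (m₂ - (m₁ + 1)) = m₂ := by omega
      rw [hm, List.drop_eq_getElem_cons h₂, hm₂]
    calc s.take m₁ ++ (' ' :: (f ++ [' '])) ++ s.drop (m₂ + 1)
        = s.take m₁ ++ ' ' :: (f ++ ' ' :: s.drop (m₂ + 1)) := by simp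
      _ = s.take m₁ ++ ' ' :: s.drop (m₁ + 1) := by rw [hf, ← hd1]
      _ = s.take m₁ ++ s.drop m₁ := by rw [List.drop_eq_getElem_cons h₁, hm₁]
      _ = s := List.take_append_drop m₁ s

-- the middle slice s[m₁+1 : m₂] as drop/take
lemma pv_slice_mid (s : List Char) {m₁ m₂ : Nat} (h₁ : m₁ < s.length) (h₂ : m₂ < s.length) :
    PySem.List.slice s (some ((m₁ : Int) + 1)) (some (m₂ : Int)) =
      (s.drop (m₁ + 1)).take (m₂ - (m₁ + 1)) := by
  have ha : ((m₁ : Int) + 1) = ((m₁ + 1 : Nat) : Int) := by push_cast; ring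
  rw [ha, PySem.List.slice_of_nonneg s (by omega) (by omega)
    (by exact_mod_cast Nat.succ_le_of_lt h₁) (by exact_mod_cast le_of_lt h₂)]
  simp

-- membership in the space-position list
lemma pv_mem_sp (padded : List Char) (i : Int) :
    i ∈ pvSp padded ↔ ∃ (m : Nat) (h : m < padded.length), padded[m] = ' ' ∧ i = (m : Int) := by
  simp only [pvSp, List.mem_map, List.mem_filter]
  constructor
  · rintro ⟨p, ⟨hp, hsp⟩, hi⟩
    rw [PySem.List.mem_enumerate_iff] at hp
    obtain ⟨k, hk, rfl⟩ := hp
    simp at hsp hi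
    exact ⟨k, hk, hsp, by omega⟩
  · rintro ⟨m, h, hm, rfl⟩
    refine ⟨((m : Int), padded[m]), ⟨?_, by simp [hm]⟩, rfl⟩
    rw [PySem.List.mem_enumerate_iff]
    exact ⟨m, h, by simp⟩

-- " f " occurs in s iff f is in B's span list
lemma pv_span_iff (s f : List Char) :
    f ∈ pvSpans s ↔ ' ' :: (f ++ [' ']) <:+: s := by
  simp only [pvSpans, List.mem_flatMap, List.mem_map, List.mem_filter]
  rw [pv_infix_iff]
  constructor
  · rintro ⟨i, hi, j, ⟨hj, hij⟩, hf⟩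
    obtain ⟨m₁, h₁, hm₁, rfl⟩ := (pv_mem_sp s i).1 hi
    obtain ⟨m₂, h₂, hm₂, rfl⟩ := (pv_mem_sp s j).1 hj
    have hlt : m₁ < m₂ := by simpa using hij
    rw [pv_slice_mid s h₁ h₂] at hf
    exact ⟨m₁, m₂, h₁, h₂, hlt, hm₁, hm₂, hf.symm⟩
  · rintro ⟨m₁, m₂, h₁, h₂, hlt, hm₁, hm₂, hf⟩
    refine ⟨(m₁ : Int), (pv_mem_sp s _).2 ⟨m₁, h₁, hm₁, rfl⟩,
      (m₂ : Int), ⟨(pv_mem_sp s _).2 ⟨m₂, h₂, hm₂, rfl⟩, by simp; exact_mod_cast hlt⟩, ?_⟩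
    rw [pv_slice_mid s h₁ h₂, hf]

-- running-best fold (A) equals max?'s fold over the filtered list (B), up to the (length, target) projection
lemma pv_fold_eq (p : String × String → Bool) (xs : List (String × String))
    (acc : Option (String × String)) :
    xs.foldl (fun best ft => if p ft then (match best with
        | none => some (ft.1.toList.length, ft.2)
        | some b => if b.1 < ft.1.toList.length then some (ft.1.toList.length, ft.2) else some b)
      else best) (acc.map (fun ft => (ft.1.toList.length, ft.2)))
    = ((xs.filter p).foldl (fun acc x => match acc with
        | none => some x
        | some m => if m.1.toList.length < x.1.toList.length then some x else some m) acc).map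
        (fun ft => (ft.1.toList.length, ft.2)) := by
  induction xs generalizing acc with
  | nil => simp
  | cons x xs ih =>
    rw [List.filter_cons]
    by_cases hp : p x
    · simp only [hp, if_pos, List.foldl_cons]
      cases acc with
      | none => exact ih (some x)
      | some m =>
        simp only [Option.map_some]
        by_cases hc : m.1.toList.length < x.1.toList.length
        · simp only [hc, if_pos]
          exact ih (some x)
        · simp only [hc, if_false]
          exact ih (some m)
    · simp only [List.foldl_cons, hp, Bool.false_eq_true, if_false]
      exact ih acc

-- ===== VERDICT (by name: the statement is the Claim_ definition above) =====
theorem substring_fallback_py_spec : Claim_equal_substring_fallback_py := by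
  intro form_key canonical_map _ hpre
  unfold Spec_substring_fallback_py substring_fallback_py substring_fallback_py_alt
  by_cases hk : form_key.toList = []
  · simp [hk]
  · simp only [hk, if_false]
    set padded : List Char := [' '] ++ form_key.toList ++ [' '] with hpad
    have hcomb : canonical_map.foldl (fun (best : Option (Nat × String)) (ft : String × String) =>
        if ft.1.toList = [] then best
        else
          if PySem.Chars.isIn ([' '] ++ ft.1.toList ++ [' ']) padded
             || PySem.Chars.startswith padded (ft.1.toList ++ [' '])
             || PySem.Chars.endswith padded ([' '] ++ ft.1.toList) then
            match best with
            | none => some (ft.1.toList.length, ft.2)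
            | some b => if b.1 < ft.1.toList.length then some (ft.1.toList.length, ft.2) else some b
          else best) none
        = canonical_map.foldl (fun best ft =>
          if (!ft.1.toList.isEmpty && (PySem.Set.ofList (pvSpans padded)).contains ft.1.toList) then
            (match best with
            | none => some (ft.1.toList.length, ft.2)
            | some b => if b.1 < ft.1.toList.length then some (ft.1.toList.length, ft.2) else some b)
          else best) none := by
      apply PySem.List.foldl_congr_mem
      intro best ft hmemft
      have hkey := hpre ft hmemft
      by_cases he : ft.1.toList = []
      · simp [he]
      · have hmem : ((PySem.Set.ofList (pvSpans padded)).contains ft.1.toList = true)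
            ↔ ft.1.toList ∈ pvSpans padded := by
          rw [← PySem.Set.mem_ofList (pvSpans padded) ft.1.toList]
          exact PySem.Set.contains_iff _ _
        have hcond : (PySem.Chars.isIn ([' '] ++ ft.1.toList ++ [' ']) padded
             || PySem.Chars.startswith padded (ft.1.toList ++ [' '])
             || PySem.Chars.endswith padded ([' '] ++ ft.1.toList))
            = (!ft.1.toList.isEmpty && (PySem.Set.ofList (pvSpans padded)).contains ft.1.toList) := by
          rw [Bool.eq_iff_iff]
          simp only [Bool.or_eq_true, Bool.and_eq_true, Bool.not_eq_true', List.isEmpty_eq_false_iff]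
          rw [hmem, PySem.Chars.isIn_iff_infix, PySem.Chars.startswith_iff, PySem.Chars.endswith_iff,
            pv_span_iff]
          constructor
          · rintro ((hin | hpre') | hsuf)
            · exact ⟨he, by simpa using hin⟩
            · exact ⟨he, by simpa using hkey ⟨he, Or.inl hpre'⟩⟩
            · exact ⟨he, by simpa using hkey ⟨he, Or.inr hsuf⟩⟩
          · rintro ⟨-, h⟩
            exact Or.inl (Or.inl (by simpa using h))
        simp only [he, hcond]
        simp [he]
    rw [hcomb]
    have hfold := pv_fold_eq
      (fun ft => !ft.1.toList.isEmpty && (PySem.Set.ofList (pvSpans padded)).contains ft.1.toList)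
      canonical_map none
    simp only [Option.map_none] at hfold
    rw [hfold]
    have hmax : PySem.List.max?
        (canonical_map.filter
          (fun ft => !ft.1.toList.isEmpty && (PySem.Set.ofList (pvSpans padded)).contains ft.1.toList))
        (fun ft => ft.1.toList.length)
        = (canonical_map.filter
          (fun ft => !ft.1.toList.isEmpty && (PySem.Set.ofList (pvSpans padded)).contains ft.1.toList)).foldl
          (fun acc x => match acc with
            | none => some x
            | some m => if m.1.toList.length < x.1.toList.length then some x else some m) none := by
      unfold PySem.List.max?
      congr 1
      funext acc x
      cases acc <;> rfl
    rw [hmax]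
    generalize ((canonical_map.filter
          (fun ft => !ft.1.toList.isEmpty && (PySem.Set.ofList (pvSpans padded)).contains ft.1.toList)).foldl
          (fun acc x => match acc with
            | none => some x
            | some m => if m.1.toList.length < x.1.toList.length then some x else some m) none) = r
    cases r <;> rfl
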